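-- pv_equiv track=rewrite | github.com/MolEvolEpid/MachineLearningModelforHIVOutbreaks | Python/HIVTraceInterface.py | _trace_clusters
-- ===== SOURCE A (Python) =====
-- from typing import Dict, Tuple, List
-- from collections import defaultdict
--
-- def _trace_clusters(cluster_sizes: list[int], infectious_labels: list, cluster_ids: list, *args,
--                     **kwargs) -> Tuple[Dict[int, list], List[Dict[int, int]]]:
--     """
--     Reconstruct the clusters for each image.
--     Args:
--         cluster_sizes:
--         infectious_labels:
--         cluster_ids:
--
--     Returns:
--         dict of discovered clusters represented in each original cluster
--         dict of sizes of each discovered cluster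
--
--     """
--
--     position = 0
--     left, right = 0, 0
--     found_counts = []
--     for cluster_id, cluster_size in enumerate(cluster_sizes):
--         cluster_summation = defaultdict(lambda: 0)  # on new key, set total to 0
--
--         right += cluster_size
--         while position < right:  # traverse the container once
--             if position in infectious_labels:
--                 loc = infectious_labels.index(position)
--                 label = cluster_ids[loc]
--                 cluster_summation[label] += 1  # initialized to 0 if not found
--
--             position += 1
--
--         found_counts.append(dict(cluster_summation))
--     found_clusters = {idx: list(v.keys()) for idx, v in enumerate(found_counts)}
--     return found_clusters, found_counts
-- ===== SOURCE B (Python) =====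
-- from typing import Dict, Tuple, List
--
--
-- def _trace_clusters(cluster_sizes: list[int], infectious_labels: list, cluster_ids: list, *args,
--                     **kwargs) -> Tuple[Dict[int, list], List[Dict[int, int]]]:
--     # First occurrence index of every listed position.
--     first = {}
--     for i, p in enumerate(infectious_labels):
--         if p not in first:
--             first[p] = i
--     # Positions in ascending order; negative ones are never visited.
--     pts = sorted(first)
--     j = 0
--     while j < len(pts) and pts[j] < 0:
--         j += 1
--     # Sweep the cluster boundaries once, consuming positions with a pointer.
--     found_counts = []
--     hi = 0
--     for size in cluster_sizes:
--         hi += size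
--         counts = {}
--         while j < len(pts) and pts[j] < hi:
--             label = cluster_ids[first[pts[j]]]
--             counts[label] = counts.get(label, 0) + 1
--             j += 1
--         found_counts.append(counts)
--     found_clusters = {idx: list(c) for idx, c in enumerate(found_counts)}
--     return found_clusters, found_counts
-- ===== Notes on version B (the rewrite author's own statement) =====
-- stated objective: faster
-- what changed: A scans every integer position in [0,total) and runs list.index inside the scan; B builds a first-occurrence dict over infectious_labels once, sorts the distinct positions, and sweeps the cumulative cluster boundaries with a single advancing pointer, so the per-position membership scan and the repeated list.index disappear.
import Mathlib
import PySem

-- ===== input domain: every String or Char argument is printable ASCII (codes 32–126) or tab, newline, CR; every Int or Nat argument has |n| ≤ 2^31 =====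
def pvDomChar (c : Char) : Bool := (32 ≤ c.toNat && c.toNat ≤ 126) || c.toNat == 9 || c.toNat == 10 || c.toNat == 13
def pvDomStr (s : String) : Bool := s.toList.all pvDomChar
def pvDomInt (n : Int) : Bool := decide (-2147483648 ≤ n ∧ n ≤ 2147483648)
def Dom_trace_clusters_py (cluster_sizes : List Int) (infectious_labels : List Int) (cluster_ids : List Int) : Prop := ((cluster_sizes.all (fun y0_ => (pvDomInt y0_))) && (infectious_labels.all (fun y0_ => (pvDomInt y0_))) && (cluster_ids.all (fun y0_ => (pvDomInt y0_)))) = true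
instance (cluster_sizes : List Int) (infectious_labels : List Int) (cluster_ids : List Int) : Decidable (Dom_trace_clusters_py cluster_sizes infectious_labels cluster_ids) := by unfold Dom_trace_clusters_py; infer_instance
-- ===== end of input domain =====

-- B replaces A's scan of every integer position (with a per-position membership test and
-- list.index over infectious_labels) by a first-occurrence dict, the sorted distinct
-- positions and one advancing pointer over the cumulative cluster boundaries.

-- ===== PORT A =====
-- inner `while position < right` loop; `cluster_ids[loc]` out of range is Python's
-- IndexError, excluded by Pre_, the port then takes 0
def pvAInner (labels ids : List Int) (right : Int) (pos : Int) (cnt : PySem.Dict Int Int) :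
    Int × PySem.Dict Int Int :=
  if _h : pos < right then
    let cnt' :=
      match PySem.List.index? labels pos with
      | some loc =>
        let label := (PySem.List.pyGet? ids (loc : Int)).getD 0
        cnt.insert label (cnt.getD label 0 + 1)
      | none => cnt
    pvAInner labels ids right (pos + 1) cnt'
  else (pos, cnt)
termination_by (right - pos).toNat
decreasing_by omega

def trace_clusters_py (cluster_sizes : List Int) (infectious_labels : List Int) (cluster_ids : List Int) : (List (Int × List Int)) × (List (List (Int × Int))) :=
  let st := cluster_sizes.foldl
    (fun st size =>
      let right := st.2.1 + size
      let r := pvAInner infectious_labels cluster_ids right st.1 PySem.Dict.empty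
      (r.1, right, st.2.2 ++ [r.2]))
    ((0 : Int), (0 : Int), ([] : List (PySem.Dict Int Int)))
  let found_counts := st.2.2
  ((PySem.List.enumerate found_counts 0).map (fun p => (p.1, p.2.keys)),
   found_counts.map (fun d => d.items))

-- ===== PORT B =====
-- `first[p] = i` on the first occurrence of p only
def pvFirst (labels : List Int) : PySem.Dict Int Int :=
  (PySem.List.enumerate labels 0).foldl
    (fun d p => if d.contains p.2 then d else d.insert p.2 p.1) PySem.Dict.empty

-- `while j < len(pts) and pts[j] < 0: j += 1`
def pvSkipNeg : List Int → List Int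
  | [] => []
  | p :: rest => if p < 0 then pvSkipNeg rest else p :: rest

-- `while j < len(pts) and pts[j] < hi: ...`; `cluster_ids[first[pts[j]]]` out of
-- range (IndexError, excluded by Pre_) takes 0, as in port A
def pvBInner (first : PySem.Dict Int Int) (ids : List Int) (hi : Int) :
    List Int → PySem.Dict Int Int → List Int × PySem.Dict Int Int
  | [], cnt => ([], cnt)
  | p :: rest, cnt =>
    if p < hi then
      let label := (PySem.List.pyGet? ids ((first.get? p).getD 0)).getD 0
      pvBInner first ids hi rest (cnt.insert label (cnt.getD label 0 + 1))
    else (p :: rest, cnt)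

def trace_clusters_py_alt (cluster_sizes : List Int) (infectious_labels : List Int) (cluster_ids : List Int) : (List (Int × List Int)) × (List (List (Int × Int))) :=
  let first := pvFirst infectious_labels
  let pts := PySem.List.sorted first.keys (fun x => x) false
  let rem0 := pvSkipNeg pts
  let st := cluster_sizes.foldl
    (fun st size =>
      let hi := st.1 + size
      let r := pvBInner first cluster_ids hi st.2.1 PySem.Dict.empty
      (hi, r.1, st.2.2 ++ [r.2]))
    ((0 : Int), rem0, ([] : List (PySem.Dict Int Int)))
  let found_counts := st.2.2
  ((PySem.List.enumerate found_counts 0).map (fun p => (p.1, p.2.keys)),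
   found_counts.map (fun d => d.items))

-- ===== PRECONDITION & SPEC =====
-- running maximum of the prefix sums of cluster_sizes: exactly the positions A visits
def pvPrefixMax (sizes : List Int) : Int :=
  (sizes.foldl (fun st c => (max st.1 (st.2 + c), st.2 + c)) ((0 : Int), (0 : Int))).1

-- Pre_ excludes exactly the inputs on which the Python A raises IndexError: some visited
-- position whose first index in infectious_labels is past the end of cluster_ids.
def Pre_trace_clusters_py (cluster_sizes : List Int) (infectious_labels : List Int) (cluster_ids : List Int) : Prop :=
  ∀ i < infectious_labels.length,
    (infectious_labels.getD i 0 ∉ infectious_labels.take i ∧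
     0 ≤ infectious_labels.getD i 0 ∧
     infectious_labels.getD i 0 < pvPrefixMax cluster_sizes) →
    i < cluster_ids.length
instance (cluster_sizes : List Int) (infectious_labels : List Int) (cluster_ids : List Int) : Decidable (Pre_trace_clusters_py cluster_sizes infectious_labels cluster_ids) := by unfold Pre_trace_clusters_py; infer_instance

def pvWitness_trace_clusters_py : List Int × List Int × List Int := ([2], [0, 1], [5, 7])

def Spec_trace_clusters_py (cluster_sizes : List Int) (infectious_labels : List Int) (cluster_ids : List Int) (out : (List (Int × List Int)) × (List (List (Int × Int)))) : Prop := out = trace_clusters_py_alt cluster_sizes infectious_labels cluster_ids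
instance (cluster_sizes : List Int) (infectious_labels : List Int) (cluster_ids : List Int) (out : (List (Int × List Int)) × (List (List (Int × Int)))) : Decidable (Spec_trace_clusters_py cluster_sizes infectious_labels cluster_ids out) := by unfold Spec_trace_clusters_py; infer_instance

-- ===== CLAIM (what is proved, stated in full; the proofs are below) =====
def Claim_equal_trace_clusters_py : Prop := ∀ (cluster_sizes : List Int) (infectious_labels : List Int) (cluster_ids : List Int), Dom_trace_clusters_py cluster_sizes infectious_labels cluster_ids → Pre_trace_clusters_py cluster_sizes infectious_labels cluster_ids → Spec_trace_clusters_py cluster_sizes infectious_labels cluster_ids (trace_clusters_py cluster_sizes infectious_labels cluster_ids)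

-- ===== LEMMAS AND PROOFS =====

-- the first-occurrence dict of B looks up exactly what A's list.index computes
theorem pvFirst_get? (labels : List Int) (s : Int) (d : PySem.Dict Int Int) (p : Int) :
    ((PySem.List.enumerate labels s).foldl
        (fun d q => if d.contains q.2 then d else d.insert q.2 q.1) d).get? p
      = if d.contains p then d.get? p
        else (PySem.List.index? labels p).map (fun n => s + (n : Int)) := by
  induction labels generalizing s d with
  | nil =>
    simp only [PySem.List.enumerate_nil, List.foldl_nil]
    by_cases hc : d.contains p
    · rw [if_pos hc]
    · rw [if_neg (by simp [hc]),
        (PySem.Dict.get?_eq_none_iff_contains d p).mpr (by simp [hc])]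
      simp [PySem.List.index?]
  | cons x xs ih =>
    rw [PySem.List.enumerate_cons]
    simp only [List.foldl_cons]
    by_cases hc : d.contains x
    · rw [if_pos hc, ih]
      by_cases hp : p = x
      · subst hp; rw [if_pos hc, if_pos hc]
      · by_cases hdp : d.contains p
        · rw [if_pos hdp, if_pos hdp]
        · rw [if_neg (by simp [hdp]), if_neg (by simp [hdp])]
          rw [PySem.List.index?_cons_of_ne _ (fun h => hp h.symm)]
          cases PySem.List.index? xs p with
          | none => simp
          | some n =>
            simp
            ring
    · rw [if_neg (by simp [hc]), ih]
      by_cases hp : p = x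
      · subst hp
        rw [if_pos (by simp [PySem.Dict.contains_insert_self]), if_neg (by simp [hc])]
        rw [PySem.Dict.get?_insert_self, PySem.List.index?_cons_self]
        simp
      · have hci : (d.insert x s).contains p = d.contains p := by
          rw [PySem.Dict.contains_insert]
          simp [show (p == x) = false by simp [hp]]
        rw [hci]
        by_cases hdp : d.contains p
        · rw [if_pos hdp, if_pos hdp, PySem.Dict.get?_insert_of_ne _ _ hp]
        · rw [if_neg (by simp [hdp]), if_neg (by simp [hdp])]
          rw [PySem.List.index?_cons_of_ne _ (fun h => hp h.symm)]
          cases PySem.List.index? xs p with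
          | none => simp
          | some n =>
            simp
            ring

-- the keys of the first-occurrence dict are the distinct labels in first-seen order
theorem pvFirst_keys (labels : List Int) (s : Int) (d : PySem.Dict Int Int) :
    ((PySem.List.enumerate labels s).foldl
        (fun d q => if d.contains q.2 then d else d.insert q.2 q.1) d).keys
      = PySem.Set.update d.keys labels := by
  induction labels generalizing s d with
  | nil => simp [PySem.List.enumerate_nil, PySem.Set.update]
  | cons x xs ih =>
    rw [PySem.List.enumerate_cons]
    simp only [List.foldl_cons, PySem.Set.update_cons]
    by_cases hc : d.contains x
    · rw [if_pos hc, ih, PySem.Set.add_of_mem ((PySem.Dict.contains_iff_mem_keys d x).mp hc)]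
    · rw [if_neg (by simp [hc]), ih,
        PySem.Dict.keys_insert_of_not_contains d s (by simp [hc]),
        PySem.Set.add_of_not_mem (fun hm => hc ((PySem.Dict.contains_iff_mem_keys d x).mpr hm))]

-- dropping the leading negatives of a strictly increasing list is filtering by 0 ≤ ·
theorem pvSkipNeg_eq_filter (pts : List Int) (h : pts.Pairwise (· < ·)) :
    pvSkipNeg pts = pts.filter (fun q => decide ((0 : Int) ≤ q)) := by
  induction pts with
  | nil => rfl
  | cons p rest ih =>
    rw [List.pairwise_cons] at h
    by_cases hp : p < 0
    · rw [show pvSkipNeg (p :: rest) = pvSkipNeg rest from by simp [pvSkipNeg, hp]]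
      rw [List.filter_cons_of_neg (by simpa using hp), ih h.2]
    · rw [show pvSkipNeg (p :: rest) = p :: rest from by simp [pvSkipNeg, hp]]
      rw [List.filter_cons_of_pos (by simpa using hp)]
      congr 1
      exact (List.filter_eq_self.mpr (fun q hq => by
        have := h.1 q hq; simp; omega)).symm

theorem pvFilter_succ_of_not_mem (pts : List Int) (pos : Int) (hm : pos ∉ pts) :
    pts.filter (fun q => decide (pos ≤ q)) = pts.filter (fun q => decide (pos + 1 ≤ q)) := by
  apply List.filter_congr
  intro q hq
  have : q ≠ pos := fun h => hm (h ▸ hq)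
  simp only [decide_eq_decide]
  omega

theorem pvFilter_succ_of_mem (pts : List Int) (pos : Int) (h : pts.Pairwise (· < ·))
    (hm : pos ∈ pts) :
    pts.filter (fun q => decide (pos ≤ q)) = pos :: pts.filter (fun q => decide (pos + 1 ≤ q)) := by
  induction pts with
  | nil => cases hm
  | cons x rest ih =>
    rw [List.pairwise_cons] at h
    by_cases hx : x = pos
    · subst hx
      rw [List.filter_cons_of_pos (by simp), List.filter_cons_of_neg (by simp)]
      congr 1
      apply List.filter_congr
      intro q hq
      have := h.1 q hq
      simp only [decide_eq_decide]
      omega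
    · have hmr : pos ∈ rest := by cases hm with
        | head => exact absurd rfl hx
        | tail _ h' => exact h'
      have hxlt : x < pos := h.1 pos hmr
      rw [List.filter_cons_of_neg (by simp; omega), List.filter_cons_of_neg (by simp; omega)]
      exact ih h.2 hmr

-- B's pointer loop stops at once when every remaining position is past the boundary
theorem pvBInner_stop (first : PySem.Dict Int Int) (ids : List Int) (hi : Int)
    (rem : List Int) (cnt : PySem.Dict Int Int) (h : ∀ q ∈ rem, ¬ q < hi) :
    pvBInner first ids hi rem cnt = (rem, cnt) := by
  cases rem with
  | nil => rfl
  | cons p rest => simp [pvBInner, h p (List.mem_cons_self ..)]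

-- CORE: one run of A's position scan [pos, hi) equals one run of B's pointer loop on
-- the remaining sorted positions pts.filter (pos ≤ ·), and leaves pts.filter (max pos hi ≤ ·)
theorem pvInner_eq_aux (labels ids : List Int) (pts : List Int)
    (hsort : pts.Pairwise (· < ·)) (hmem : ∀ q, q ∈ pts ↔ q ∈ labels)
    (hi : Int) :
    ∀ (n : Nat) (pos : Int) (cnt : PySem.Dict Int Int), (hi - pos).toNat ≤ n →
    pvAInner labels ids hi pos cnt
      = (max pos hi,
         (pvBInner (pvFirst labels) ids hi (pts.filter (fun q => decide (pos ≤ q))) cnt).2)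
    ∧ (pvBInner (pvFirst labels) ids hi (pts.filter (fun q => decide (pos ≤ q))) cnt).1
        = pts.filter (fun q => decide (max pos hi ≤ q)) := by
  intro n
  induction n with
  | zero =>
    intro pos cnt hn
    have hstop : ¬ pos < hi := by omega
    have hmax : max pos hi = pos := max_eq_left (by omega)
    have hB := pvBInner_stop (pvFirst labels) ids hi
      (pts.filter (fun q => decide (pos ≤ q))) cnt
      (fun q hq => by have := List.of_mem_filter hq; simp at this; omega)
    rw [pvAInner, dif_neg hstop, hB, hmax]
    exact ⟨rfl, rfl⟩
  | succ n ih =>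
    intro pos cnt hn
    by_cases hlt : pos < hi
    · have hmax1 : max pos hi = hi := max_eq_right (by omega)
      have hmax2 : max (pos + 1) hi = hi := max_eq_right (by omega)
      have hget : (pvFirst labels).get? pos
          = (PySem.List.index? labels pos).map (fun n => (0 : Int) + (n : Int)) := by
        rw [pvFirst, pvFirst_get?]
        simp [PySem.Dict.contains_empty]
      rw [pvAInner, dif_pos hlt]
      cases hidx : PySem.List.index? labels pos with
      | none =>
        have hnp : pos ∉ pts := fun h =>
          (PySem.List.index?_eq_none_iff labels pos).mp hidx ((hmem pos).mp h)
        rw [pvFilter_succ_of_not_mem pts pos hnp]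
        have := ih (pos + 1) cnt (by omega)
        rw [hmax2] at this
        rw [hmax1]
        exact this
      | some loc =>
        have hp : pos ∈ pts := (hmem pos).mpr (by
          have := PySem.List.index?_isSome_iff labels pos
          rw [hidx] at this
          simpa using this)
        rw [pvFilter_succ_of_mem pts pos hsort hp]
        rw [pvBInner, if_pos hlt]
        have hlab : ((pvFirst labels).get? pos).getD 0 = (loc : Int) := by
          rw [hget, hidx]; simp
        rw [hlab]
        have := ih (pos + 1) (cnt.insert ((PySem.List.pyGet? ids (loc : Int)).getD 0)
          (cnt.getD ((PySem.List.pyGet? ids (loc : Int)).getD 0) 0 + 1)) (by omega)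
        rw [hmax2] at this
        rw [hmax1]
        exact this
    · have hmax : max pos hi = pos := max_eq_left (by omega)
      have hB := pvBInner_stop (pvFirst labels) ids hi
        (pts.filter (fun q => decide (pos ≤ q))) cnt
        (fun q hq => by have := List.of_mem_filter hq; simp at this; omega)
      rw [pvAInner, dif_neg hlt, hB, hmax]
      exact ⟨rfl, rfl⟩

-- the two outer folds over cluster_sizes produce the same found_counts list
theorem pvOuter_eq (labels ids : List Int) (pts : List Int)
    (hsort : pts.Pairwise (· < ·)) (hmem : ∀ q, q ∈ pts ↔ q ∈ labels)
    (sizes : List Int) :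
    ∀ (pos h : Int) (acc : List (PySem.Dict Int Int)),
    (sizes.foldl
      (fun st size =>
        let right := st.2.1 + size
        let r := pvAInner labels ids right st.1 PySem.Dict.empty
        (r.1, right, st.2.2 ++ [r.2])) (pos, h, acc)).2.2
    = (sizes.foldl
      (fun st size =>
        let hi := st.1 + size
        let r := pvBInner (pvFirst labels) ids hi st.2.1 PySem.Dict.empty
        (hi, r.1, st.2.2 ++ [r.2])) (h, pts.filter (fun q => decide (pos ≤ q)), acc)).2.2 := by
  induction sizes with
  | nil => intro pos h acc; rfl
  | cons size rest ih =>
    intro pos h acc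
    simp only [List.foldl_cons]
    have hinner := pvInner_eq_aux labels ids pts hsort hmem (h + size)
      ((h + size) - pos).toNat pos PySem.Dict.empty (le_refl _)
    rw [hinner.1]
    have := ih (max pos (h + size)) (h + size)
      (acc ++ [(pvBInner (pvFirst labels) ids (h + size)
        (pts.filter (fun q => decide (pos ≤ q))) PySem.Dict.empty).2])
    rw [← hinner.2] at this
    exact this

theorem pvFinal (cluster_sizes infectious_labels cluster_ids : List Int) :
    trace_clusters_py cluster_sizes infectious_labels cluster_ids
      = trace_clusters_py_alt cluster_sizes infectious_labels cluster_ids := by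
  have hkeys : (pvFirst infectious_labels).keys = PySem.Set.ofList infectious_labels := by
    rw [pvFirst, pvFirst_keys, PySem.Dict.keys_empty, PySem.Set.update_nil_left]
  have hsort : (PySem.List.sorted (pvFirst infectious_labels).keys (fun x => x) false).Pairwise (· < ·) := by
    rw [hkeys]; exact PySem.List.sorted_ofList_pairwise_lt infectious_labels
  have hmem : ∀ q, q ∈ PySem.List.sorted (pvFirst infectious_labels).keys (fun x => x) false ↔ q ∈ infectious_labels := by
    intro q
    rw [PySem.List.mem_sorted, hkeys, PySem.Set.mem_ofList]
  have hrem0 : pvSkipNeg (PySem.List.sorted (pvFirst infectious_labels).keys (fun x => x) false)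
      = (PySem.List.sorted (pvFirst infectious_labels).keys (fun x => x) false).filter
          (fun q => decide ((0 : Int) ≤ q)) := pvSkipNeg_eq_filter _ hsort
  have hfc := pvOuter_eq infectious_labels cluster_ids
    (PySem.List.sorted (pvFirst infectious_labels).keys (fun x => x) false)
    hsort hmem cluster_sizes 0 0 []
  simp only [trace_clusters_py, trace_clusters_py_alt, hrem0, hfc]

-- ===== VERDICT (by name: the statement is the Claim_ definition above) =====
theorem trace_clusters_py_spec : Claim_equal_trace_clusters_py := by
  intro cluster_sizes infectious_labels cluster_ids _hdom _hpre
  unfold Spec_trace_clusters_py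
  exact pvFinal cluster_sizes infectious_labels cluster_ids
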